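-- pv_equiv track=rewrite | github.com/mkassab2015/PromptEngineeringEducation | Courses Analysis/course analysis pipleline.py | compute_swebok_mapping
-- ===== SOURCE A (Python) =====
-- from typing import Dict, Iterable, List, Optional, Tuple
--
-- def compute_swebok_mapping(topics: Iterable[str]) -> Dict[str, List[str]]:
--     """Return a rule‑based mapping from topics to SWEBOK knowledge areas.
--
--     The mapping is based on the specification provided by the user.  Each
--     topic may map to multiple knowledge areas.  Unknown topics map to
--     an empty list.
--
--     Parameters
--     ----------
--     topics: Iterable[str]
--         Collection of unique canonical topics.
--
--     Returns
--     -------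
--     dict
--         Mapping from topic to list of SWEBOK KAs.
--     """
--     mapping = {}
--     for t in topics:
--         cats = []
--         tl = t.lower()
--         # Requirements: elicitation/context needs, acceptance criteria
--         if any(k in tl for k in ["requirements", "context", "needs", "acceptance"]):
--             cats.append("Requirements")
--         # Design: architecture, roles, workflow, integration
--         if any(k in tl for k in ["design", "role", "workflow", "agent", "rag", "retrieval", "tool"]):
--             cats.append("Design")
--         # Construction: writing, structuring prompts, tuning
--         if any(k in tl for k in ["prompt", "tuning", "optimization", "p-tuning", "prefix"]):
--             cats.append("Construction")
--         # Testing/Evaluation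
--         if any(k in tl for k in ["evaluation", "debug", "metric", "rubric", "test"]):
--             cats.append("Testing")
--         # Maintenance: lifecycle, versioning, monitoring
--         if any(k in tl for k in ["lifecycle", "version", "monitor", "maintenance"]):
--             cats.append("Maintenance")
--         # Configuration management
--         if any(k in tl for k in ["repository", "dataset", "configuration", "context window"]):
--             cats.append("Configuration Management")
--         # Engineering management: risk, scheduling, governance
--         if any(k in tl for k in ["risk", "governance", "management", "schedule"]):
--             cats.append("Engineering Management")
--         # Process: pipelines, llmops
--         if any(k in tl for k in ["pipeline", "process", "ops", "llmops", "workflow"]):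
--             cats.append("Process")
--         # Models & Methods
--         if any(k in tl for k in ["chain-of-thought", "cot", "self-consistency", "few-shot", "zero-shot", "in-context"]):
--             cats.append("Models & Methods")
--         # Quality
--         if any(k in tl for k in ["quality", "robust", "bias", "hallucination", "guardrails", "fairness", "safety"]):
--             cats.append("Quality")
--         # Professional Practice / Ethics
--         if any(k in tl for k in ["ethic", "bias", "fairness", "safety", "risk"]):
--             cats.append("Professional Practice/Ethics")
--         # Economics
--         if any(k in tl for k in ["cost", "efficiency", "token", "latency"]):
--             cats.append("Economics")
--         # Foundations
--         if any(k in tl for k in ["transformer", "llm", "architecture", "fine-tuning", "rlhf", "foundation"]):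
--             cats.append("Foundations")
--         # Remove duplicates
--         mapping[t] = list(dict.fromkeys(cats))
--     return mapping
-- ===== SOURCE B (Python) =====
-- # Different matching engine: instead of scanning the keyword list per category,
-- # build an inverted index keyword -> category indices once, then enumerate the
-- # bounded-length substrings of each lowercased topic and look them up in the
-- # index, collecting the set of matched category indices; finally emit the
-- # category names by scanning the rule table once and keeping the matched ones.
--
-- _RULES = [
--     ("Requirements", ["requirements", "context", "needs", "acceptance"]),
--     ("Design", ["design", "role", "workflow", "agent", "rag", "retrieval", "tool"]),
--     ("Construction", ["prompt", "tuning", "optimization", "p-tuning", "prefix"]),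
--     ("Testing", ["evaluation", "debug", "metric", "rubric", "test"]),
--     ("Maintenance", ["lifecycle", "version", "monitor", "maintenance"]),
--     ("Configuration Management", ["repository", "dataset", "configuration", "context window"]),
--     ("Engineering Management", ["risk", "governance", "management", "schedule"]),
--     ("Process", ["pipeline", "process", "ops", "llmops", "workflow"]),
--     ("Models & Methods", ["chain-of-thought", "cot", "self-consistency", "few-shot", "zero-shot", "in-context"]),
--     ("Quality", ["quality", "robust", "bias", "hallucination", "guardrails", "fairness", "safety"]),
--     ("Professional Practice/Ethics", ["ethic", "bias", "fairness", "safety", "risk"]),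
--     ("Economics", ["cost", "efficiency", "token", "latency"]),
--     ("Foundations", ["transformer", "llm", "architecture", "fine-tuning", "rlhf", "foundation"]),
-- ]
--
-- # Inverted index: keyword -> list of rule indices owning it.
-- _KW = {}
-- for _i, _rule in enumerate(_RULES):
--     for _k in _rule[1]:
--         _KW.setdefault(_k, []).append(_i)
-- _MAXLEN = max(len(_k) for _k in _KW)
--
--
-- def compute_swebok_mapping(topics):
--     mapping = {}
--     for t in topics:
--         tl = t.lower()
--         n = len(tl)
--         hit = set()
--         for i in range(n):
--             for m in range(1, _MAXLEN + 1):
--                 hit.update(_KW.get(tl[i:i + m], ()))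
--         mapping[t] = [r[0] for i, r in enumerate(_RULES) if i in hit]
--     return mapping
-- ===== Notes on version B (the rewrite author's own statement) =====
-- stated objective: alternative
-- what changed: Instead of scanning every category's keyword list against the topic (13 'any(k in tl ...)' branches plus a dict.fromkeys dedup), B builds an inverted keyword->rule-index hash table once, enumerates the bounded-length substrings of each lowercased topic and looks them up, collecting a set of matched rule indices, then emits names by one filtered scan of the rule table.
import Mathlib
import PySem

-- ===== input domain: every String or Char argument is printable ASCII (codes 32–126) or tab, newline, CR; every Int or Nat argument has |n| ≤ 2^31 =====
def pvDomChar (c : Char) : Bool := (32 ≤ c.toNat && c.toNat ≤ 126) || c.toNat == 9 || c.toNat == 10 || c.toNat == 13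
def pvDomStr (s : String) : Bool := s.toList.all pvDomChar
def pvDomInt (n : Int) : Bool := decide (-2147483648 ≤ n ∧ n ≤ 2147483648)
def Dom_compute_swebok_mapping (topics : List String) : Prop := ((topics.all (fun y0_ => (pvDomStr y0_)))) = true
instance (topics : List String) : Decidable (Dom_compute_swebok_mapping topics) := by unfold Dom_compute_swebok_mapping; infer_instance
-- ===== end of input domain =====

-- B replaces A's per-category keyword scans by a different matching engine: an inverted
-- keyword → rule-index hash table queried with every bounded-length substring of the
-- lowercased topic (objective: alternative, same asymptotic cost on these input sizes).

-- ===== PORT A =====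
def compute_swebok_mapping (topics : List String) : List (String × List String) :=
  (topics.foldl (fun (mapping : PySem.Dict String (List String)) t =>
      let tl := PySem.Str.lower t
      let cats : List String := []
      let cats := if ["requirements", "context", "needs", "acceptance"].any (fun k => PySem.Str.isIn k tl) then cats ++ ["Requirements"] else cats
      let cats := if ["design", "role", "workflow", "agent", "rag", "retrieval", "tool"].any (fun k => PySem.Str.isIn k tl) then cats ++ ["Design"] else cats
      let cats := if ["prompt", "tuning", "optimization", "p-tuning", "prefix"].any (fun k => PySem.Str.isIn k tl) then cats ++ ["Construction"] else cats
      let cats := if ["evaluation", "debug", "metric", "rubric", "test"].any (fun k => PySem.Str.isIn k tl) then cats ++ ["Testing"] else cats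
      let cats := if ["lifecycle", "version", "monitor", "maintenance"].any (fun k => PySem.Str.isIn k tl) then cats ++ ["Maintenance"] else cats
      let cats := if ["repository", "dataset", "configuration", "context window"].any (fun k => PySem.Str.isIn k tl) then cats ++ ["Configuration Management"] else cats
      let cats := if ["risk", "governance", "management", "schedule"].any (fun k => PySem.Str.isIn k tl) then cats ++ ["Engineering Management"] else cats
      let cats := if ["pipeline", "process", "ops", "llmops", "workflow"].any (fun k => PySem.Str.isIn k tl) then cats ++ ["Process"] else cats
      let cats := if ["chain-of-thought", "cot", "self-consistency", "few-shot", "zero-shot", "in-context"].any (fun k => PySem.Str.isIn k tl) then cats ++ ["Models & Methods"] else cats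
      let cats := if ["quality", "robust", "bias", "hallucination", "guardrails", "fairness", "safety"].any (fun k => PySem.Str.isIn k tl) then cats ++ ["Quality"] else cats
      let cats := if ["ethic", "bias", "fairness", "safety", "risk"].any (fun k => PySem.Str.isIn k tl) then cats ++ ["Professional Practice/Ethics"] else cats
      let cats := if ["cost", "efficiency", "token", "latency"].any (fun k => PySem.Str.isIn k tl) then cats ++ ["Economics"] else cats
      let cats := if ["transformer", "llm", "architecture", "fine-tuning", "rlhf", "foundation"].any (fun k => PySem.Str.isIn k tl) then cats ++ ["Foundations"] else cats
      mapping.insert t (PySem.List.dedup cats))   -- list(dict.fromkeys(cats))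
    PySem.Dict.empty).items

-- ===== PORT B =====
def swebokRules : List (String × List String) :=
  [ ("Requirements", ["requirements", "context", "needs", "acceptance"]),
    ("Design", ["design", "role", "workflow", "agent", "rag", "retrieval", "tool"]),
    ("Construction", ["prompt", "tuning", "optimization", "p-tuning", "prefix"]),
    ("Testing", ["evaluation", "debug", "metric", "rubric", "test"]),
    ("Maintenance", ["lifecycle", "version", "monitor", "maintenance"]),
    ("Configuration Management", ["repository", "dataset", "configuration", "context window"]),
    ("Engineering Management", ["risk", "governance", "management", "schedule"]),
    ("Process", ["pipeline", "process", "ops", "llmops", "workflow"]),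
    ("Models & Methods", ["chain-of-thought", "cot", "self-consistency", "few-shot", "zero-shot", "in-context"]),
    ("Quality", ["quality", "robust", "bias", "hallucination", "guardrails", "fairness", "safety"]),
    ("Professional Practice/Ethics", ["ethic", "bias", "fairness", "safety", "risk"]),
    ("Economics", ["cost", "efficiency", "token", "latency"]),
    ("Foundations", ["transformer", "llm", "architecture", "fine-tuning", "rlhf", "foundation"]) ]

-- inverted index keyword -> rule indices; Dict.modify k [] (· ++ [i]) is _KW.setdefault(k, []).append(i)
def kwTable : PySem.Dict String (List Int) :=
  (PySem.List.enumerate swebokRules 0).foldl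
    (fun d e => e.2.2.foldl (fun d k => d.modify k [] (fun ids => ids ++ [e.1])) d)
    PySem.Dict.empty

-- max(len(k) for k in _KW); the table is nonempty, so the .getD 0 default is never used
def kwMaxLen : Int :=
  (PySem.List.max? (kwTable.keys.map (fun k => PySem.Str.len k)) (fun x => x)).getD 0

def compute_swebok_mapping_alt (topics : List String) : List (String × List String) :=
  (topics.foldl (fun (mapping : PySem.Dict String (List String)) t =>
      let tl := PySem.Str.lower t
      let n := PySem.Str.len tl
      let hit : PySem.Set Int :=
        (PySem.List.pyRange 0 n 1).foldl (fun hit i =>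
          (PySem.List.pyRange 1 (kwMaxLen + 1) 1).foldl (fun hit m =>
            PySem.Set.update hit (kwTable.getD (PySem.Str.slice tl (some i) (some (i + m))) [])) hit)
          PySem.Set.empty
      mapping.insert t
        (((PySem.List.enumerate swebokRules 0).filter (fun e => PySem.Set.contains hit e.1)).map
          (fun e => e.2.1)))
    PySem.Dict.empty).items

-- ===== PRECONDITION & SPEC =====
def Spec_compute_swebok_mapping (topics : List String) (out : List (String × List String)) : Prop := out = compute_swebok_mapping_alt topics
instance (topics : List String) (out : List (String × List String)) : Decidable (Spec_compute_swebok_mapping topics out) := by unfold Spec_compute_swebok_mapping; infer_instance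

-- ===== CLAIM (what is proved, stated in full; the proofs are below) =====
def Claim_equal_compute_swebok_mapping : Prop := ∀ (topics : List String), Dom_compute_swebok_mapping topics → Spec_compute_swebok_mapping topics (compute_swebok_mapping topics)

-- ===== LEMMAS AND PROOFS =====

-- ---- A side: the chain of thirteen conditional appends is filter-then-project ----

theorem foldl_rules_eq_filter_map (p : String × List String → Bool)
    (rs : List (String × List String)) (acc : List String) :
    rs.foldl (fun a r => if p r then a ++ [r.1] else a) acc
      = acc ++ (rs.filter p).map (·.1) := by
  induction rs generalizing acc with
  | nil => simp
  | cons r rs ih =>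
    simp only [List.foldl_cons, List.filter_cons]
    by_cases h : p r <;> simp [h, ih]

theorem chainA_eq_foldl (tl : String) :
    (let cats : List String := []
     let cats := if ["requirements", "context", "needs", "acceptance"].any (fun k => PySem.Str.isIn k tl) then cats ++ ["Requirements"] else cats
     let cats := if ["design", "role", "workflow", "agent", "rag", "retrieval", "tool"].any (fun k => PySem.Str.isIn k tl) then cats ++ ["Design"] else cats
     let cats := if ["prompt", "tuning", "optimization", "p-tuning", "prefix"].any (fun k => PySem.Str.isIn k tl) then cats ++ ["Construction"] else cats
     let cats := if ["evaluation", "debug", "metric", "rubric", "test"].any (fun k => PySem.Str.isIn k tl) then cats ++ ["Testing"] else cats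
     let cats := if ["lifecycle", "version", "monitor", "maintenance"].any (fun k => PySem.Str.isIn k tl) then cats ++ ["Maintenance"] else cats
     let cats := if ["repository", "dataset", "configuration", "context window"].any (fun k => PySem.Str.isIn k tl) then cats ++ ["Configuration Management"] else cats
     let cats := if ["risk", "governance", "management", "schedule"].any (fun k => PySem.Str.isIn k tl) then cats ++ ["Engineering Management"] else cats
     let cats := if ["pipeline", "process", "ops", "llmops", "workflow"].any (fun k => PySem.Str.isIn k tl) then cats ++ ["Process"] else cats
     let cats := if ["chain-of-thought", "cot", "self-consistency", "few-shot", "zero-shot", "in-context"].any (fun k => PySem.Str.isIn k tl) then cats ++ ["Models & Methods"] else cats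
     let cats := if ["quality", "robust", "bias", "hallucination", "guardrails", "fairness", "safety"].any (fun k => PySem.Str.isIn k tl) then cats ++ ["Quality"] else cats
     let cats := if ["ethic", "bias", "fairness", "safety", "risk"].any (fun k => PySem.Str.isIn k tl) then cats ++ ["Professional Practice/Ethics"] else cats
     let cats := if ["cost", "efficiency", "token", "latency"].any (fun k => PySem.Str.isIn k tl) then cats ++ ["Economics"] else cats
     if ["transformer", "llm", "architecture", "fine-tuning", "rlhf", "foundation"].any (fun k => PySem.Str.isIn k tl) then cats ++ ["Foundations"] else cats)
    = swebokRules.foldl (fun a r => if r.2.any (fun k => PySem.Str.isIn k tl) then a ++ [r.1] else a) [] := by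
  simp only [swebokRules, List.foldl_cons, List.foldl_nil]

theorem nodup_filtered (p : String × List String → Bool) :
    ((swebokRules.filter p).map (·.1)).Nodup := by
  have hsub : ((swebokRules.filter p).map (·.1)).Sublist (swebokRules.map (·.1)) :=
    (List.filter_sublist (l := swebokRules)).map (·.1)
  exact (by decide : (swebokRules.map (·.1)).Nodup).sublist hsub

theorem valueA_eq (t : String) :
    PySem.List.dedup
      (let tl := PySem.Str.lower t
       let cats : List String := []
       let cats := if ["requirements", "context", "needs", "acceptance"].any (fun k => PySem.Str.isIn k tl) then cats ++ ["Requirements"] else cats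
       let cats := if ["design", "role", "workflow", "agent", "rag", "retrieval", "tool"].any (fun k => PySem.Str.isIn k tl) then cats ++ ["Design"] else cats
       let cats := if ["prompt", "tuning", "optimization", "p-tuning", "prefix"].any (fun k => PySem.Str.isIn k tl) then cats ++ ["Construction"] else cats
       let cats := if ["evaluation", "debug", "metric", "rubric", "test"].any (fun k => PySem.Str.isIn k tl) then cats ++ ["Testing"] else cats
       let cats := if ["lifecycle", "version", "monitor", "maintenance"].any (fun k => PySem.Str.isIn k tl) then cats ++ ["Maintenance"] else cats
       let cats := if ["repository", "dataset", "configuration", "context window"].any (fun k => PySem.Str.isIn k tl) then cats ++ ["Configuration Management"] else cats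
       let cats := if ["risk", "governance", "management", "schedule"].any (fun k => PySem.Str.isIn k tl) then cats ++ ["Engineering Management"] else cats
       let cats := if ["pipeline", "process", "ops", "llmops", "workflow"].any (fun k => PySem.Str.isIn k tl) then cats ++ ["Process"] else cats
       let cats := if ["chain-of-thought", "cot", "self-consistency", "few-shot", "zero-shot", "in-context"].any (fun k => PySem.Str.isIn k tl) then cats ++ ["Models & Methods"] else cats
       let cats := if ["quality", "robust", "bias", "hallucination", "guardrails", "fairness", "safety"].any (fun k => PySem.Str.isIn k tl) then cats ++ ["Quality"] else cats
       let cats := if ["ethic", "bias", "fairness", "safety", "risk"].any (fun k => PySem.Str.isIn k tl) then cats ++ ["Professional Practice/Ethics"] else cats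
       let cats := if ["cost", "efficiency", "token", "latency"].any (fun k => PySem.Str.isIn k tl) then cats ++ ["Economics"] else cats
       if ["transformer", "llm", "architecture", "fine-tuning", "rlhf", "foundation"].any (fun k => PySem.Str.isIn k tl) then cats ++ ["Foundations"] else cats)
    = (swebokRules.filter (fun r => r.2.any (fun k => PySem.Str.isIn k (PySem.Str.lower t)))).map (·.1) := by
  rw [chainA_eq_foldl (PySem.Str.lower t),
      foldl_rules_eq_filter_map (fun r => r.2.any (fun k => PySem.Str.isIn k (PySem.Str.lower t)))]
  simp only [List.nil_append]
  rw [PySem.List.dedup_eq_ofList]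
  exact PySem.Set.ofList_eq_self_of_nodup _ (nodup_filtered _)

-- ---- B side: characterise membership in the substring-lookup hit set ----

-- a fold whose step only adds elements satisfying P is characterised by P
theorem mem_foldl_iff {α β : Type} [BEq α] [LawfulBEq α] (l : List β)
    (f : PySem.Set α → β → PySem.Set α) (P : β → α → Prop)
    (h : ∀ s y x, x ∈ f s y ↔ x ∈ s ∨ P y x) (s0 : PySem.Set α) (x : α) :
    x ∈ l.foldl f s0 ↔ x ∈ s0 ∨ ∃ y ∈ l, P y x := by
  induction l generalizing s0 with
  | nil => simp
  | cons y ys ih =>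
    rw [List.foldl_cons, ih, h]
    constructor
    · rintro (( hs | hp) | ⟨z, hz, hpz⟩)
      · exact Or.inl hs
      · exact Or.inr ⟨y, List.mem_cons_self, hp⟩
      · exact Or.inr ⟨z, List.mem_cons_of_mem _ hz, hpz⟩
    · rintro (hs | ⟨z, hz, hpz⟩)
      · exact Or.inl (Or.inl hs)
      · rcases List.mem_cons.mp hz with rfl | hz
        · exact Or.inl (Or.inr hpz)
        · exact Or.inr ⟨z, hz, hpz⟩

theorem mem_update {α : Type} [BEq α] [LawfulBEq α] (s : PySem.Set α) (l : List α) (x : α) :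
    x ∈ PySem.Set.update s l ↔ x ∈ s ∨ x ∈ l := by
  show x ∈ l.foldl PySem.Set.add s ↔ _
  rw [mem_foldl_iff l PySem.Set.add (fun y x => x = y)
        (fun s y x => PySem.Set.mem_add s y x) s x]
  simp

theorem hit_spec (tl : String) (x : Int) :
    (x ∈ (PySem.List.pyRange 0 (PySem.Str.len tl) 1).foldl (fun hit i =>
        (PySem.List.pyRange 1 (kwMaxLen + 1) 1).foldl (fun hit m =>
          PySem.Set.update hit (kwTable.getD (PySem.Str.slice tl (some i) (some (i + m))) [])) hit)
        PySem.Set.empty)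
    ↔ ∃ i ∈ PySem.List.pyRange 0 (PySem.Str.len tl) 1, ∃ m ∈ PySem.List.pyRange 1 (kwMaxLen + 1) 1,
        x ∈ kwTable.getD (PySem.Str.slice tl (some i) (some (i + m))) [] := by
  rw [mem_foldl_iff _ _
      (fun i x => ∃ m ∈ PySem.List.pyRange 1 (kwMaxLen + 1) 1,
        x ∈ kwTable.getD (PySem.Str.slice tl (some i) (some (i + m))) [])
      (fun s i x => by
        rw [mem_foldl_iff _ _
            (fun m x => x ∈ kwTable.getD (PySem.Str.slice tl (some i) (some (i + m))) [])
            (fun s m x => mem_update s _ x) s x])]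
  simp [PySem.Set.empty]

-- concrete facts about the inverted index (checked by the kernel)
set_option maxRecDepth 8192 in
theorem kw_sound : ∀ p ∈ kwTable.items, ∀ i ∈ p.2,
    ∀ e ∈ PySem.List.enumerate swebokRules 0, e.1 = i → p.1 ∈ e.2.2 := by decide

set_option maxRecDepth 8192 in
theorem kw_complete : ∀ e ∈ PySem.List.enumerate swebokRules 0, ∀ k ∈ e.2.2,
    e.1 ∈ kwTable.getD k [] ∧ 1 ≤ PySem.Str.len k ∧ PySem.Str.len k ≤ kwMaxLen := by decide

theorem contains_hit_eq (t : String) (e : Int × (String × List String))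
    (he : e ∈ PySem.List.enumerate swebokRules 0) :
    PySem.Set.contains
      ((PySem.List.pyRange 0 (PySem.Str.len (PySem.Str.lower t)) 1).foldl (fun hit i =>
        (PySem.List.pyRange 1 (kwMaxLen + 1) 1).foldl (fun hit m =>
          PySem.Set.update hit
            (kwTable.getD (PySem.Str.slice (PySem.Str.lower t) (some i) (some (i + m))) [])) hit)
        PySem.Set.empty) e.1
    = e.2.2.any (fun k => PySem.Str.isIn k (PySem.Str.lower t)) := by
  set tl := PySem.Str.lower t with htl
  apply Bool.coe_iff_coe.mp
  rw [PySem.Set.contains_iff, hit_spec, List.any_eq_true]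
  constructor
  · rintro ⟨i, hi, m, hm, hx⟩
    rw [PySem.Dict.getD_eq_get?_getD] at hx
    cases hget : kwTable.get? (PySem.Str.slice tl (some i) (some (i + m))) with
    | none => rw [hget] at hx; simp at hx
    | some ids =>
      rw [hget] at hx; simp at hx
      have hitems := PySem.Dict.mem_items_of_get?_eq_some kwTable hget
      have hkw := kw_sound _ hitems e.1 hx e he rfl
      refine ⟨_, hkw, ?_⟩
      rw [PySem.List.mem_pyRange_one] at hi hm
      rw [PySem.Str.isIn_iff_infix, PySem.Str.toList_slice, PySem.Chars.slice_eq_listSlice]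
      have hs := PySem.List.slice_toNat (xs := tl.toList) (a := i) (b := i + m)
        (by omega) (by omega)
      rw [hs]
      exact ((List.take_prefix _ _).isInfix).trans ((List.drop_suffix _ _).isInfix)
  · rintro ⟨k, hk, hin⟩
    obtain ⟨hidx, hlen1, hlen2⟩ := kw_complete e he k hk
    rw [PySem.Str.isIn_eq] at hin
    obtain ⟨j, hpre⟩ := (PySem.Chars.exists_prefix_drop_iff_isIn k.toList tl.toList).mpr hin
    rw [PySem.Str.len_eq] at hlen1 hlen2
    have hkne : k.toList ≠ [] := by
      intro hnil; rw [hnil] at hlen1; simp at hlen1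
    have hjlt : j < tl.toList.length := by
      apply List.length_lt_of_drop_ne_nil
      intro hnil; rw [hnil, List.prefix_nil] at hpre; exact hkne hpre
    refine ⟨(j : Int), ?_, (k.toList.length : Int), ?_, ?_⟩
    · rw [PySem.List.mem_pyRange_one, PySem.Str.len_eq]
      exact ⟨by omega, by exact_mod_cast hjlt⟩
    · rw [PySem.List.mem_pyRange_one]
      exact ⟨by omega, by omega⟩
    · have hslice : PySem.Str.slice tl (some (j : Int)) (some ((j : Int) + (k.toList.length : Int))) = k := by
        apply String.toList_inj.mp
        rw [PySem.Str.toList_slice, PySem.Chars.slice_eq_listSlice, PySem.List.slice_natCast_add]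
        exact (List.prefix_iff_eq_take.mp hpre).symm
      rw [hslice]
      exact hidx

theorem valueB_eq (t : String) :
    ((PySem.List.enumerate swebokRules 0).filter (fun e =>
        PySem.Set.contains
          ((PySem.List.pyRange 0 (PySem.Str.len (PySem.Str.lower t)) 1).foldl (fun hit i =>
            (PySem.List.pyRange 1 (kwMaxLen + 1) 1).foldl (fun hit m =>
              PySem.Set.update hit
                (kwTable.getD (PySem.Str.slice (PySem.Str.lower t) (some i) (some (i + m))) [])) hit)
            PySem.Set.empty) e.1)).map (fun e => e.2.1)
    = (swebokRules.filter (fun r => r.2.any (fun k => PySem.Str.isIn k (PySem.Str.lower t)))).map (·.1) := by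
  rw [List.filter_congr (fun e he => contains_hit_eq t e he)]
  have h1 : ((PySem.List.enumerate swebokRules 0).filter
        (fun e => e.2.2.any (fun k => PySem.Str.isIn k (PySem.Str.lower t)))).map (fun e => e.2)
      = swebokRules.filter (fun r => r.2.any (fun k => PySem.Str.isIn k (PySem.Str.lower t))) := by
    rw [← PySem.List.map_snd_enumerate swebokRules 0, List.filter_map]
    rfl
  calc ((PySem.List.enumerate swebokRules 0).filter
          (fun e => e.2.2.any (fun k => PySem.Str.isIn k (PySem.Str.lower t)))).map (fun e => e.2.1)
      = (((PySem.List.enumerate swebokRules 0).filter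
          (fun e => e.2.2.any (fun k => PySem.Str.isIn k (PySem.Str.lower t)))).map (fun e => e.2)).map (·.1) := by
        rw [List.map_map]; rfl
    _ = (swebokRules.filter (fun r => r.2.any (fun k => PySem.Str.isIn k (PySem.Str.lower t)))).map (·.1) := by
        rw [h1]

-- ---- the two dict-building folds agree step by step ----

theorem fold_eq (topics : List String) (d : PySem.Dict String (List String)) :
    topics.foldl (fun (mapping : PySem.Dict String (List String)) t =>
      let tl := PySem.Str.lower t
      let cats : List String := []
      let cats := if ["requirements", "context", "needs", "acceptance"].any (fun k => PySem.Str.isIn k tl) then cats ++ ["Requirements"] else cats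
      let cats := if ["design", "role", "workflow", "agent", "rag", "retrieval", "tool"].any (fun k => PySem.Str.isIn k tl) then cats ++ ["Design"] else cats
      let cats := if ["prompt", "tuning", "optimization", "p-tuning", "prefix"].any (fun k => PySem.Str.isIn k tl) then cats ++ ["Construction"] else cats
      let cats := if ["evaluation", "debug", "metric", "rubric", "test"].any (fun k => PySem.Str.isIn k tl) then cats ++ ["Testing"] else cats
      let cats := if ["lifecycle", "version", "monitor", "maintenance"].any (fun k => PySem.Str.isIn k tl) then cats ++ ["Maintenance"] else cats
      let cats := if ["repository", "dataset", "configuration", "context window"].any (fun k => PySem.Str.isIn k tl) then cats ++ ["Configuration Management"] else cats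
      let cats := if ["risk", "governance", "management", "schedule"].any (fun k => PySem.Str.isIn k tl) then cats ++ ["Engineering Management"] else cats
      let cats := if ["pipeline", "process", "ops", "llmops", "workflow"].any (fun k => PySem.Str.isIn k tl) then cats ++ ["Process"] else cats
      let cats := if ["chain-of-thought", "cot", "self-consistency", "few-shot", "zero-shot", "in-context"].any (fun k => PySem.Str.isIn k tl) then cats ++ ["Models & Methods"] else cats
      let cats := if ["quality", "robust", "bias", "hallucination", "guardrails", "fairness", "safety"].any (fun k => PySem.Str.isIn k tl) then cats ++ ["Quality"] else cats
      let cats := if ["ethic", "bias", "fairness", "safety", "risk"].any (fun k => PySem.Str.isIn k tl) then cats ++ ["Professional Practice/Ethics"] else cats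
      let cats := if ["cost", "efficiency", "token", "latency"].any (fun k => PySem.Str.isIn k tl) then cats ++ ["Economics"] else cats
      let cats := if ["transformer", "llm", "architecture", "fine-tuning", "rlhf", "foundation"].any (fun k => PySem.Str.isIn k tl) then cats ++ ["Foundations"] else cats
      mapping.insert t (PySem.List.dedup cats)) d
    = topics.foldl (fun (mapping : PySem.Dict String (List String)) t =>
        let tl := PySem.Str.lower t
        let n := PySem.Str.len tl
        let hit : PySem.Set Int :=
          (PySem.List.pyRange 0 n 1).foldl (fun hit i =>
            (PySem.List.pyRange 1 (kwMaxLen + 1) 1).foldl (fun hit m =>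
              PySem.Set.update hit (kwTable.getD (PySem.Str.slice tl (some i) (some (i + m))) [])) hit)
            PySem.Set.empty
        mapping.insert t
          (((PySem.List.enumerate swebokRules 0).filter (fun e => PySem.Set.contains hit e.1)).map
            (fun e => e.2.1))) d := by
  have hbody : (fun (mapping : PySem.Dict String (List String)) t =>
      let tl := PySem.Str.lower t
      let cats : List String := []
      let cats := if ["requirements", "context", "needs", "acceptance"].any (fun k => PySem.Str.isIn k tl) then cats ++ ["Requirements"] else cats
      let cats := if ["design", "role", "workflow", "agent", "rag", "retrieval", "tool"].any (fun k => PySem.Str.isIn k tl) then cats ++ ["Design"] else cats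
      let cats := if ["prompt", "tuning", "optimization", "p-tuning", "prefix"].any (fun k => PySem.Str.isIn k tl) then cats ++ ["Construction"] else cats
      let cats := if ["evaluation", "debug", "metric", "rubric", "test"].any (fun k => PySem.Str.isIn k tl) then cats ++ ["Testing"] else cats
      let cats := if ["lifecycle", "version", "monitor", "maintenance"].any (fun k => PySem.Str.isIn k tl) then cats ++ ["Maintenance"] else cats
      let cats := if ["repository", "dataset", "configuration", "context window"].any (fun k => PySem.Str.isIn k tl) then cats ++ ["Configuration Management"] else cats
      let cats := if ["risk", "governance", "management", "schedule"].any (fun k => PySem.Str.isIn k tl) then cats ++ ["Engineering Management"] else cats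
      let cats := if ["pipeline", "process", "ops", "llmops", "workflow"].any (fun k => PySem.Str.isIn k tl) then cats ++ ["Process"] else cats
      let cats := if ["chain-of-thought", "cot", "self-consistency", "few-shot", "zero-shot", "in-context"].any (fun k => PySem.Str.isIn k tl) then cats ++ ["Models & Methods"] else cats
      let cats := if ["quality", "robust", "bias", "hallucination", "guardrails", "fairness", "safety"].any (fun k => PySem.Str.isIn k tl) then cats ++ ["Quality"] else cats
      let cats := if ["ethic", "bias", "fairness", "safety", "risk"].any (fun k => PySem.Str.isIn k tl) then cats ++ ["Professional Practice/Ethics"] else cats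
      let cats := if ["cost", "efficiency", "token", "latency"].any (fun k => PySem.Str.isIn k tl) then cats ++ ["Economics"] else cats
      let cats := if ["transformer", "llm", "architecture", "fine-tuning", "rlhf", "foundation"].any (fun k => PySem.Str.isIn k tl) then cats ++ ["Foundations"] else cats
      mapping.insert t (PySem.List.dedup cats))
    = (fun (mapping : PySem.Dict String (List String)) t =>
        let tl := PySem.Str.lower t
        let n := PySem.Str.len tl
        let hit : PySem.Set Int :=
          (PySem.List.pyRange 0 n 1).foldl (fun hit i =>
            (PySem.List.pyRange 1 (kwMaxLen + 1) 1).foldl (fun hit m =>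
              PySem.Set.update hit (kwTable.getD (PySem.Str.slice tl (some i) (some (i + m))) [])) hit)
            PySem.Set.empty
        mapping.insert t
          (((PySem.List.enumerate swebokRules 0).filter (fun e => PySem.Set.contains hit e.1)).map
            (fun e => e.2.1))) := by
    funext mapping t
    exact congrArg (mapping.insert t) ((valueA_eq t).trans (valueB_eq t).symm)
  rw [hbody]

-- ===== VERDICT (by name: the statement is the Claim_ definition above) =====
theorem compute_swebok_mapping_spec : Claim_equal_compute_swebok_mapping := by
  intro topics _
  unfold Spec_compute_swebok_mapping compute_swebok_mapping compute_swebok_mapping_alt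
  exact congrArg PySem.Dict.items (fold_eq topics PySem.Dict.empty)
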